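-- pv_equiv track=rewrite | github.com/yagnesh97/superaze-fb-graph | app/automation/worker.py | refine_hashtags
-- ===== SOURCE A (Python) =====
-- def refine_hashtags(
--     hashtags: list[str | None]
-- ) -> tuple[list[str], list[str]]:
--     """Refines hashtags by stripping and sorting."""
--     tags_wo_hash = [
--         tag.replace("#", "").strip() for tag in hashtags if tag and tag.strip()
--     ]
--     tags_w_hash = ["#" + tag for tag in tags_wo_hash]
--     return sorted(tags_w_hash), sorted(tags_wo_hash)
-- ===== SOURCE B (Python) =====
-- def refine_hashtags(
--     hashtags: list[str | None]
-- ) -> tuple[list[str], list[str]]: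
--     """Single online pass: each normalized tag is inserted at its sorted position
--     (insertion sort with an always-sorted accumulator); the '#'-prefixed list is
--     then read off the sorted accumulator (a shared prefix preserves order)."""
--     wo = []
--     for tag in hashtags:
--         if tag and tag.strip():
--             t = tag.replace("#", "").strip()
--             i = 0
--             while i < len(wo) and wo[i] <= t:
--                 i += 1
--             wo.insert(i, t)
--     return ["#" + x for x in wo], wo
-- ===== Notes on version B (the rewrite author's own statement) =====
-- stated objective: alternative
-- what changed: B replaces A's build-two-lists-then-call-sorted-twice pipeline by a single online insertion sort: one loop keeps an always-sorted accumulator into which each normalized tag is inserted at its position, and both output lists are read off that accumulator at the end (no call to sorted at all).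
import Mathlib
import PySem

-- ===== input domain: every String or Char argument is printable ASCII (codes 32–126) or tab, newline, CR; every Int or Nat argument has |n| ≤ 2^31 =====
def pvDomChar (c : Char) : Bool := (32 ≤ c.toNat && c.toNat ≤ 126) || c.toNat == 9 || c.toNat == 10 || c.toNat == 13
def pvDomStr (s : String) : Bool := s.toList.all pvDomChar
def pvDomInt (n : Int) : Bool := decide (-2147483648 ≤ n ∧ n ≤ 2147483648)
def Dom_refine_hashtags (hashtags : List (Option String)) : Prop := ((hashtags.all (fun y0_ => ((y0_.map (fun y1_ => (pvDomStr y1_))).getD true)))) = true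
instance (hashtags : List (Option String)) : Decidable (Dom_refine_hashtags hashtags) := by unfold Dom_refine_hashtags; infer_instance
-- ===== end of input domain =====

-- B replaces A's two sorted() calls by a single online insertion sort: one loop keeps an
-- always-sorted accumulator and both output lists are read off it; objective: alternative.


-- ===== PORT A =====
def refine_hashtags (hashtags : List (Option String)) : List String × List String :=
  let tags_wo_hash := hashtags.flatMap (fun tag =>
    match tag with
    | some t => if t ≠ "" ∧ PySem.Str.strip t ≠ "" then
        [PySem.Str.strip (PySem.Str.replace t "#" "")] else []
    | none => [])
  let tags_w_hash := tags_wo_hash.map (fun tag => "#" ++ tag)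
  (PySem.List.sorted tags_w_hash (fun x => x) false,
   PySem.List.sorted tags_wo_hash (fun x => x) false)

-- ===== PORT B =====
-- the inner while loop of Source B: skip the leading elements ≤ t, place t before the rest
def insertSorted : List String → String → List String
  | [], t => [t]
  | x :: xs, t => if x ≤ t then x :: insertSorted xs t else t :: x :: xs

def refine_hashtags_alt (hashtags : List (Option String)) : List String × List String :=
  let wo := hashtags.foldl (fun acc tag =>
    match tag with
    | some t => if t ≠ "" ∧ PySem.Str.strip t ≠ "" then
        insertSorted acc (PySem.Str.strip (PySem.Str.replace t "#" "")) else acc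
    | none => acc) []
  (wo.map (fun x => "#" ++ x), wo)

-- ===== PRECONDITION & SPEC =====
def Spec_refine_hashtags (hashtags : List (Option String)) (out : List String × List String) : Prop := out = refine_hashtags_alt hashtags
instance (hashtags : List (Option String)) (out : List String × List String) : Decidable (Spec_refine_hashtags hashtags out) := by unfold Spec_refine_hashtags; infer_instance

-- ===== CLAIM =====
def Claim_equal_refine_hashtags : Prop := ∀ (hashtags : List (Option String)), Dom_refine_hashtags hashtags → Spec_refine_hashtags hashtags (refine_hashtags hashtags)

-- ===== LEMMAS AND PROOFS =====

theorem insertSorted_perm (l : List String) (t : String) :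
    (insertSorted l t).Perm (t :: l) := by
  induction l with
  | nil => simp [insertSorted]
  | cons x xs ih =>
    simp only [insertSorted]
    split_ifs with h
    · exact (ih.cons x).trans (List.Perm.swap t x xs)
    · exact List.Perm.refl _

theorem mem_insertSorted {l : List String} {t y : String} (h : y ∈ insertSorted l t) :
    y = t ∨ y ∈ l := by
  have := (insertSorted_perm l t).mem_iff.mp h
  simpa using this

theorem insertSorted_pairwise {l : List String} (t : String)
    (h : l.Pairwise (· ≤ ·)) : (insertSorted l t).Pairwise (· ≤ ·) := by
  induction l with
  | nil => simp [insertSorted]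
  | cons x xs ih =>
    rcases List.pairwise_cons.mp h with ⟨hx, hxs⟩
    simp only [insertSorted]
    split_ifs with hle
    · refine List.pairwise_cons.mpr ⟨?_, ih hxs⟩
      intro y hy
      rcases mem_insertSorted hy with rfl | hy'
      · exact hle
      · exact hx y hy'
    · refine List.pairwise_cons.mpr ⟨?_, h⟩
      intro y hy
      have ht : t ≤ x := le_of_lt (lt_of_not_ge hle)
      rcases List.mem_cons.mp hy with rfl | hy'
      · exact ht
      · exact ht.trans (hx y hy')

-- the fold step of B
def stepB (acc : List String) (tag : Option String) : List String :=
  match tag with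
  | some t => if t ≠ "" ∧ PySem.Str.strip t ≠ "" then
      insertSorted acc (PySem.Str.strip (PySem.Str.replace t "#" "")) else acc
  | none => acc

-- the per-element normalized contribution (A's comprehension body)
def elemsA (tag : Option String) : List String :=
  match tag with
  | some t => if t ≠ "" ∧ PySem.Str.strip t ≠ "" then
      [PySem.Str.strip (PySem.Str.replace t "#" "")] else []
  | none => []

theorem foldB_perm (hashtags : List (Option String)) :
    ∀ acc : List String,
      (hashtags.foldl stepB acc).Perm (acc ++ hashtags.flatMap elemsA) := by
  induction hashtags with
  | nil => intro acc; simp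
  | cons tag rest ih =>
    intro acc
    have hstep : (stepB acc tag).Perm (acc ++ elemsA tag) := by
      cases tag with
      | none => simp [stepB, elemsA]
      | some t =>
        simp only [stepB, elemsA]
        split_ifs with h
        · exact (insertSorted_perm acc _).trans
            (List.perm_append_comm (l₁ := [_]) (l₂ := acc))
        · simp
    have h1 := ih (stepB acc tag)
    have h2 : ((stepB acc tag) ++ rest.flatMap elemsA).Perm
        (acc ++ (tag :: rest).flatMap elemsA) := by
      have he : (tag :: rest).flatMap elemsA = elemsA tag ++ rest.flatMap elemsA := by simp
      rw [he, ← List.append_assoc]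
      exact hstep.append_right _
    exact h1.trans h2

theorem foldB_pairwise (hashtags : List (Option String)) :
    ∀ acc : List String, acc.Pairwise (· ≤ ·) →
      (hashtags.foldl stepB acc).Pairwise (· ≤ ·) := by
  induction hashtags with
  | nil => intro acc h; simpa using h
  | cons tag rest ih =>
    intro acc h
    refine ih _ ?_
    cases tag with
    | none => exact h
    | some t =>
      simp only [stepB]
      split_ifs with hc
      · exact insertSorted_pairwise _ h
      · exact h

-- B's accumulator ends up exactly at Python's sorted of the normalized list
theorem foldB_eq_sorted (hashtags : List (Option String)) :
    hashtags.foldl stepB [] =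
      PySem.List.sorted (hashtags.flatMap elemsA) (fun x => x) false := by
  have h1 : (hashtags.foldl stepB []).Perm (hashtags.flatMap elemsA) := by
    simpa using foldB_perm hashtags []
  have h2 : (hashtags.foldl stepB []).Pairwise (· ≤ ·) :=
    foldB_pairwise hashtags [] (by simp)
  have h := PySem.List.sorted_id_eq_of_perm_of_pairwise _ _ h1 h2
  exact h.symm

-- prepending the constant "#" is monotone for String ≤
theorem hash_mono (a b : String) (h : a ≤ b) : ("#" ++ a : String) ≤ "#" ++ b := by
  rw [String.le_iff_toList_le] at h ⊢
  rw [String.toList_append, String.toList_append]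
  show ('#' :: a.toList) ≤ ('#' :: b.toList)
  exact List.cons_le_cons '#' h

-- sorting the '#'-mapped list = mapping '#' over the sorted list
theorem sorted_map_hash (wo : List String) :
    PySem.List.sorted (wo.map (fun t => "#" ++ t)) (fun x => x) false
      = (PySem.List.sorted wo (fun x => x) false).map (fun t => "#" ++ t) := by
  apply PySem.List.sorted_id_eq_of_perm_of_pairwise
  · exact (PySem.List.sorted_perm wo (fun x => x) false).map _
  · exact List.Pairwise.map _ (fun a b hab => hash_mono a b hab)
      (PySem.List.sorted_pairwise wo (fun x => x))

-- ===== VERDICT =====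
theorem refine_hashtags_spec : Claim_equal_refine_hashtags := by
  intro hashtags _
  unfold Spec_refine_hashtags refine_hashtags refine_hashtags_alt
  have hfold : (hashtags.foldl (fun acc tag =>
      match tag with
      | some t => if t ≠ "" ∧ PySem.Str.strip t ≠ "" then
          insertSorted acc (PySem.Str.strip (PySem.Str.replace t "#" "")) else acc
      | none => acc) []) =
      PySem.List.sorted (hashtags.flatMap elemsA) (fun x => x) false :=
    foldB_eq_sorted hashtags
  show (PySem.List.sorted ((hashtags.flatMap elemsA).map (fun tag => "#" ++ tag)) (fun x => x) false,
        PySem.List.sorted (hashtags.flatMap elemsA) (fun x => x) false) = _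
  simp only [hfold, sorted_map_hash]
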